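-- pv_equiv track=rewrite | github.com/Owen175/wagner-fischer-spellchecker | wagner-fischer.py | __insert_word
-- ===== SOURCE A (Python) =====
-- def __insert_word(rankings, array):
--     dist = array[1]
--     if len(rankings) == 0:
--         return [array]
--     for i, (_, y) in enumerate(rankings):
--         if y > dist:
--             return rankings[:i] + [array] + rankings[i:]
--     # returns at the raw length - is adjusted later if the array needs to be a certain length
--     return rankings + [array]
-- ===== SOURCE B (Python) =====
-- def __insert_word(rankings, array):
--     # Structural recursion: peel off entries whose distance is <= array's
--     # (ties stay before the new entry), then cons the new entry in front.
--     if not rankings or rankings[0][1] > array[1]: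
--         return [array] + rankings
--     return [rankings[0]] + __insert_word(rankings[1:], array)
-- ===== Notes on version B (the rewrite author's own statement) =====
-- stated objective: alternative
-- what changed: Replaces the enumerate scan with explicit slicing by a recursive decomposition: strip the prefix of entries with distance <= the new one and cons the new pair in front of the rest.
import Mathlib
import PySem

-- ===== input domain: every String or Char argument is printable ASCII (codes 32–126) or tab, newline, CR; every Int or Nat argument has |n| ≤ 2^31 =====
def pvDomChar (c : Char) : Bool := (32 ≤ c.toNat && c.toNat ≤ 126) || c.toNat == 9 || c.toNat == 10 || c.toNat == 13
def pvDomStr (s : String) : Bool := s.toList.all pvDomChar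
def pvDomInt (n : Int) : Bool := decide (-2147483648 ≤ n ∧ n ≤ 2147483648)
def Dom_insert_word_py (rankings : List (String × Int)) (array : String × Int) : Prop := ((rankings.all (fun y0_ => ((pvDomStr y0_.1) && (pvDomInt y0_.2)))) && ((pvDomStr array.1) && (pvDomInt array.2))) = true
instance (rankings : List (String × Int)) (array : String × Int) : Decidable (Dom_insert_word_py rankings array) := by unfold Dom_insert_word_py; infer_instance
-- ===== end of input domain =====

-- B replaces A's enumerate-scan-with-slicing by a structural recursion on the list (alternative decomposition, same cost).


-- ===== PORT A =====
-- the 'for i, (_, y) in enumerate(rankings)' loop with its early returns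
def insertLoopA (rankings : List (String × Int)) (array : String × Int) (dist : Int) :
    List (Int × (String × Int)) → List (String × Int)
  | [] => rankings ++ [array]
  | (i, (_, y)) :: rest =>
      if y > dist then
        PySem.List.slice rankings none (some i) ++ [array] ++ PySem.List.slice rankings (some i) none
      else insertLoopA rankings array dist rest

def insert_word_py (rankings : List (String × Int)) (array : String × Int) : List (String × Int) :=
  let dist := array.2
  if rankings.length == 0 then [array]
  else insertLoopA rankings array dist (PySem.List.enumerate rankings)

-- ===== PORT B =====
def insert_word_py_alt (rankings : List (String × Int)) (array : String × Int) : List (String × Int) :=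
  match rankings with
  | [] => [array]
  | p :: rest => if p.2 > array.2 then array :: p :: rest else p :: insert_word_py_alt rest array

-- ===== PRECONDITION & SPEC =====
def Spec_insert_word_py (rankings : List (String × Int)) (array : String × Int) (out : List (String × Int)) : Prop := out = insert_word_py_alt rankings array
instance (rankings : List (String × Int)) (array : String × Int) (out : List (String × Int)) : Decidable (Spec_insert_word_py rankings array out) := by unfold Spec_insert_word_py; infer_instance

-- ===== CLAIM (what is proved, stated in full; the proofs are below) =====
def Claim_equal_insert_word_py : Prop := ∀ (rankings : List (String × Int)) (array : String × Int), Dom_insert_word_py rankings array → Spec_insert_word_py rankings array (insert_word_py rankings array)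

-- ===== LEMMAS AND PROOFS =====
lemma insertLoopA_enumerate (array : String × Int) :
    ∀ (rs pre : List (String × Int)),
      insertLoopA (pre ++ rs) array array.2 (PySem.List.enumerate rs (pre.length : Int))
        = pre ++ insert_word_py_alt rs array := by
  intro rs
  induction rs with
  | nil => intro pre; simp [PySem.List.enumerate, insertLoopA, insert_word_py_alt]
  | cons p rest ih =>
    intro pre
    rw [PySem.List.enumerate_cons]
    obtain ⟨w, y⟩ := p
    by_cases hy : y > array.2
    · simp only [insertLoopA, insert_word_py_alt, if_pos hy]
      rw [PySem.List.slice_to_natCast, PySem.List.slice_from_natCast]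
      simp
    · simp only [insertLoopA, insert_word_py_alt, if_neg hy]
      have h1 : ((pre.length : Int) + 1) = (((pre ++ [(w, y)]).length : Nat) : Int) := by
        simp
      have h2 : pre ++ (w, y) :: rest = (pre ++ [(w, y)]) ++ rest := by simp
      rw [h1, h2, ih (pre ++ [(w, y)])]
      simp

-- ===== VERDICT (by name: the statement is the Claim_ definition above) =====
theorem insert_word_py_spec : Claim_equal_insert_word_py := by
  intro rankings array _
  unfold Spec_insert_word_py insert_word_py
  cases rankings with
  | nil => simp [insert_word_py_alt]
  | cons p rest =>
    simp only [List.length_cons, beq_iff_eq, Nat.succ_ne_zero]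
    have := insertLoopA_enumerate array (p :: rest) []
    simpa using this
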